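-- pv_equiv track=rewrite | github.com/jnchengtarantino/AOC2024 | d12.py | findPlot
-- ===== SOURCE A (Python) =====
-- def findPlot(y:int, x:int, garden: list[list[str]], visited: set[tuple[int,int]]) -> tuple[int,int]:
--     visited.add((y,x))
--     area, adj = 1, 0
--     for dy, dx in [(0, 1), (1, 0), (0, -1), (-1, 0)]:
--         if inMap(garden, y + dy, x + dx) and garden[y+dy][x+dx] == garden[y][x]:
--             adj = adj + 1
--             if (y+dy, x+dx) not in visited:
--                 dArea, dAdj = findPlot(y+dy, x+dx, garden, visited)
--                 area = area + dArea
--                 adj = adj + dAdj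
--
--     return area, adj
--
-- def inMap(map: list[list], y: int, x: int) -> bool:
--     return 0 <= y < len(map) and 0 <= x <len(map[0])
-- ===== SOURCE B (Python) =====
-- # Iterative flood fill with an explicit stack (no recursion); mutates `visited`
-- # the same way A does (region cells are merged into it at the end).
-- def findPlot(y, x, garden, visited):
--     DIRS = [(0, 1), (1, 0), (0, -1), (-1, 0)]
--     area = 0
--     adj = 0
--     processed = set()
--     stack = [(y, x)]
--     while stack:
--         cy, cx = stack.pop()
--         if (cy, cx) in processed:
--             continue
--         processed.add((cy, cx))
--         area += 1
--         # push in reverse so neighbours are popped in reading order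
--         for dy, dx in reversed(DIRS):
--             ny, nx = cy + dy, cx + dx
--             if inMap(garden, ny, nx) and garden[ny][nx] == garden[cy][cx]:
--                 adj += 1
--                 if (ny, nx) not in visited and (ny, nx) not in processed:
--                     stack.append((ny, nx))
--     visited |= processed
--     return area, adj
--
-- def inMap(map, y, x):
--     return 0 <= y < len(map) and 0 <= x < len(map[0])
-- ===== Notes on version B (the rewrite author's own statement) =====
-- stated objective: alternative
-- what changed: The recursive DFS (one call per region cell, mutating the visited set through the call tree) is replaced by an iterative flood fill with an explicit stack and a processed set: pop a cell, skip if already processed, count its area and same-colour adjacencies, and push unseen same-colour neighbours; no recursion.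
-- outside the precondition, e.g. on findPlot(0, 0, [['a', 'b'], ['c']], set()): A returns (1, 0), B returns (1, 0)
import Mathlib
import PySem

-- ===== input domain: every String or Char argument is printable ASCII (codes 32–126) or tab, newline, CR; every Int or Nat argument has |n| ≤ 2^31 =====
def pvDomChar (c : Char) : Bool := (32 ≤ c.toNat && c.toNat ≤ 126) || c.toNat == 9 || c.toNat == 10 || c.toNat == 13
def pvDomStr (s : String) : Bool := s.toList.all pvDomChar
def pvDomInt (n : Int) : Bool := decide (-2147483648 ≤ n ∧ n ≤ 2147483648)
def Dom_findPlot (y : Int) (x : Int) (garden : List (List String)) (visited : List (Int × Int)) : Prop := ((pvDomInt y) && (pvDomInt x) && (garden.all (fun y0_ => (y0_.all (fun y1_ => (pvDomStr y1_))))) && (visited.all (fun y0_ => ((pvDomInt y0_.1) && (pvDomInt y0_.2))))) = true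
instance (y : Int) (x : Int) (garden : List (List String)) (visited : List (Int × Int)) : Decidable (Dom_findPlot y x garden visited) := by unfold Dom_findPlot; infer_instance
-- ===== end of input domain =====

-- B replaces A's recursive DFS by an iterative stack flood fill with a processed set;
-- both mutate the Python `visited` set identically (region cells merged in); the theorems
-- below are about the returned (area, adj) pair.

-- ===== PORT A =====
-- shared module helper: inMap(map, y, x)
def pvInMap (g : List (List String)) (y x : Int) : Bool :=
  decide (0 ≤ y) && decide (y < (g.length : Int)) && decide (0 ≤ x) && decide (x < ((g.headD []).length : Int))

-- garden[y][x] (Python indexing; none = IndexError)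
def pvColor (g : List (List String)) (y x : Int) : Option String :=
  (PySem.List.pyGet? g y).bind fun row => PySem.List.pyGet? row x

-- the loop condition `inMap(garden, cy+dy, cx+dx) and garden[cy+dy][cx+dx] == garden[cy][cx]`
def pvGuard (g : List (List String)) (cy cx : Int) (d : Int × Int) : Bool :=
  pvInMap g (cy + d.1) (cx + d.2) && (pvColor g (cy + d.1) (cx + d.2) == pvColor g cy cx)

def pvDirs : List (Int × Int) := [(0, 1), (1, 0), (0, -1), (-1, 0)]

-- A's body: add (y,x) to visited, fold the four directions, recursing on unvisited
-- same-colour neighbours.  Fuel only makes the recursion structural; the wrapper's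
-- fuel is proved sufficient below (pvGoA_top_isSome), so the `none` branch is never taken.
def pvGoA (g : List (List String)) : Nat → Int → Int → PySem.Set (Int × Int) →
    Option (Int × Int × PySem.Set (Int × Int))
  | 0, _, _, _ => none
  | f + 1, y, x, v0 =>
    pvDirs.foldl
      (fun st d => st.bind fun s =>
        if pvGuard g y x d then
          if PySem.Set.contains s.2.2 (y + d.1, x + d.2) then some (s.1, s.2.1 + 1, s.2.2)
          else (pvGoA g f (y + d.1) (x + d.2) s.2.2).map fun t => (s.1 + t.1, s.2.1 + 1 + t.2.1, t.2.2)
        else some s)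
      (some (1, 0, PySem.Set.add v0 (y, x)))

def findPlot (y : Int) (x : Int) (garden : List (List String)) (visited : List (Int × Int)) : Int × Int :=
  ((pvGoA garden (garden.length * (garden.headD []).length + 3) y x (PySem.Set.ofList visited)).map
    fun t => (t.1, t.2.1)).getD (0, 0)

-- ===== PORT B =====
-- B's inner for-loop over reversed(DIRS): count adj, push unseen same-colour neighbours
def pvPush (g : List (List String)) (cy cx : Int) (vis p : PySem.Set (Int × Int))
    (acc : List (Int × Int) × Int) (d : Int × Int) : List (Int × Int) × Int :=
  if pvGuard g cy cx d then
    if !PySem.Set.contains vis (cy + d.1, cx + d.2) && !PySem.Set.contains p (cy + d.1, cx + d.2) then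
      ((cy + d.1, cx + d.2) :: acc.1, acc.2 + 1)
    else (acc.1, acc.2 + 1)
  else acc

-- B's while-loop: pop, skip if processed, else mark, count, push.  Fuel as above
-- (sufficiency proved in pvLoopB_isSome).
def pvLoopB (g : List (List String)) (vis : PySem.Set (Int × Int)) :
    Nat → List (Int × Int) → PySem.Set (Int × Int) → Int → Int → Option (Int × Int)
  | 0, _, _, _, _ => none
  | _ + 1, [], _, a, b => some (a, b)
  | f + 1, c :: st, p, a, b =>
    if PySem.Set.contains p c then pvLoopB g vis f st p a b
    else
      let p1 := PySem.Set.add p c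
      let r := pvDirs.reverse.foldl (pvPush g c.1 c.2 vis p1) (st, b)
      pvLoopB g vis f r.1 p1 (a + 1) r.2

def findPlot_alt (y : Int) (x : Int) (garden : List (List String)) (visited : List (Int × Int)) : Int × Int :=
  (pvLoopB garden (PySem.Set.ofList visited) (5 * (garden.length * (garden.headD []).length) + 6)
    [(y, x)] PySem.Set.empty 0 0).getD (0, 0)

-- ===== PRECONDITION & SPEC =====
-- Pre_ excludes exactly the inputs where the Python A raises IndexError — a start cell whose
-- garden[y][x] lookup is out of range while some neighbour is in the map, or a ragged garden
-- (a row shorter than row 0) whose short row gets indexed; it keeps the trivially safe case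
-- where no neighbour is in the map (A returns (1,0) touching nothing).  It is slightly
-- conservative: a ragged garden whose short rows are never reached makes A return normally
-- but is excluded (see cites).
def Pre_findPlot (y : Int) (x : Int) (garden : List (List String)) (visited : List (Int × Int)) : Prop :=
  (∀ d ∈ pvDirs, pvInMap garden (y + d.1) (x + d.2) = false) ∨
  ((∀ row ∈ garden, (garden.headD []).length ≤ row.length) ∧ (pvColor garden y x).isSome = true)
instance (y : Int) (x : Int) (garden : List (List String)) (visited : List (Int × Int)) : Decidable (Pre_findPlot y x garden visited) := by unfold Pre_findPlot; infer_instance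

def pvWitness_findPlot : Int × Int × List (List String) × (List (Int × Int)) :=
  (0, 0, [["a", "a"], ["b", "a"]], [])

def Spec_findPlot (y : Int) (x : Int) (garden : List (List String)) (visited : List (Int × Int)) (out : Int × Int) : Prop := out = findPlot_alt y x garden visited
instance (y : Int) (x : Int) (garden : List (List String)) (visited : List (Int × Int)) (out : Int × Int) : Decidable (Spec_findPlot y x garden visited out) := by unfold Spec_findPlot; infer_instance

-- ===== CLAIM (what is proved, stated in full; the proofs are below) =====
def Claim_equal_findPlot : Prop := ∀ (y : Int) (x : Int) (garden : List (List String)) (visited : List (Int × Int)), Dom_findPlot y x garden visited → Pre_findPlot y x garden visited → Spec_findPlot y x garden visited (findPlot y x garden visited)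

-- ===== LEMMAS AND PROOFS =====

theorem pv_witness_ok :
    Dom_findPlot pvWitness_findPlot.1 pvWitness_findPlot.2.1 pvWitness_findPlot.2.2.1 pvWitness_findPlot.2.2.2 ∧
    Pre_findPlot pvWitness_findPlot.1 pvWitness_findPlot.2.1 pvWitness_findPlot.2.2.1 pvWitness_findPlot.2.2.2 := by
  decide

-- A's step function, named for the proofs
def pvStepA (g : List (List String)) (f : Nat) (y x : Int)
    (st : Option (Int × Int × PySem.Set (Int × Int))) (d : Int × Int) :
    Option (Int × Int × PySem.Set (Int × Int)) :=
  st.bind fun s =>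
    if pvGuard g y x d then
      if PySem.Set.contains s.2.2 (y + d.1, x + d.2) then some (s.1, s.2.1 + 1, s.2.2)
      else (pvGoA g f (y + d.1) (x + d.2) s.2.2).map fun t => (s.1 + t.1, s.2.1 + 1 + t.2.1, t.2.2)
    else some s

theorem pvGoA_succ (g : List (List String)) (f : Nat) (y x : Int) (v0 : PySem.Set (Int × Int)) :
    pvGoA g (f + 1) y x v0 =
      pvDirs.foldl (pvStepA g f y x) (some (1, 0, PySem.Set.add v0 (y, x))) := rfl

theorem pvContains_false {s : List (Int × Int)} {c : Int × Int} (h : c ∉ s) :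
    PySem.Set.contains s c = false := by simp; exact h

theorem pvContains_true {s : List (Int × Int)} {c : Int × Int} (h : c ∈ s) :
    PySem.Set.contains s c = true := by simp; exact h

theorem pvFoldA_none (g : List (List String)) (f : Nat) (y x : Int) (ds : List (Int × Int)) :
    ds.foldl (pvStepA g f y x) none = none := by
  induction ds with
  | nil => rfl
  | cons d ds ih => simpa [pvStepA] using ih

theorem pvFoldA_sub (g : List (List String)) (f : Nat) (y x : Int)
    (hrec : ∀ y' x' v t, pvGoA g f y' x' v = some t → ∀ n, n ∈ v → n ∈ t.2.2) :
    ∀ (ds : List (Int × Int)) (acc : Int × Int × PySem.Set (Int × Int)) t,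
      ds.foldl (pvStepA g f y x) (some acc) = some t → ∀ n, n ∈ acc.2.2 → n ∈ t.2.2 := by
  intro ds
  induction ds with
  | nil => intro acc t h n hn; cases h; exact hn
  | cons d ds ih =>
    intro acc t h n hn
    rw [List.foldl_cons] at h
    by_cases hg : pvGuard g y x d = true
    · by_cases hc : PySem.Set.contains acc.2.2 (y + d.1, x + d.2) = true
      · simp only [pvStepA, Option.bind_some, hg, if_true, hc] at h
        exact ih _ _ h n hn
      · simp only [pvStepA, Option.bind_some, hg, if_true, hc, if_false, Bool.false_eq_true] at h
        cases hE : pvGoA g f (y + d.1) (x + d.2) acc.2.2 with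
        | none => rw [hE] at h; simp only [Option.map_none] at h; rw [pvFoldA_none] at h; cases h
        | some t1 =>
          rw [hE] at h; simp only [Option.map_some] at h
          exact ih _ _ h n (hrec _ _ _ _ hE n hn)
    · simp only [pvStepA, Option.bind_some, hg, if_false, Bool.false_eq_true] at h
      exact ih _ _ h n hn

theorem pvGoA_sub (g : List (List String)) :
    ∀ (f : Nat) (y x : Int) v t, pvGoA g f y x v = some t → ∀ n, n ∈ v → n ∈ t.2.2 := by
  intro f
  induction f with
  | zero => intro y x v t h; cases h
  | succ f ih =>
    intro y x v t h n hn
    rw [pvGoA_succ] at h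
    exact pvFoldA_sub g f y x ih pvDirs _ t h n ((PySem.Set.mem_add v (y, x) n).mpr (Or.inl hn))

-- the finite board and the unvisited in-map cells, for the fuel bounds
noncomputable def pvCells (g : List (List String)) : Finset (Int × Int) :=
  Finset.Icc (0 : Int) ((g.length : Int) - 1) ×ˢ Finset.Icc (0 : Int) (((g.headD []).length : Int) - 1)

theorem pvInMap_iff_mem (g : List (List String)) (c : Int × Int) :
    pvInMap g c.1 c.2 = true ↔ c ∈ pvCells g := by
  simp [pvInMap, pvCells, Finset.mem_Icc]
  omega

theorem pvCells_card (g : List (List String)) :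
    (pvCells g).card = g.length * (g.headD []).length := by
  simp [pvCells, Int.card_Icc]
  try omega

noncomputable def pvIMU (g : List (List String)) (v : List (Int × Int)) : Finset (Int × Int) :=
  (pvCells g).filter (fun c => c ∉ v)

theorem pvIMU_subset_cells (g : List (List String)) (v : List (Int × Int)) :
    pvIMU g v ⊆ pvCells g := Finset.filter_subset _ _

theorem pvIMU_anti (g : List (List String)) {v v' : List (Int × Int)}
    (h : ∀ n, n ∈ v → n ∈ v') : (pvIMU g v').card ≤ (pvIMU g v).card := by
  apply Finset.card_le_card
  intro c hc
  simp only [pvIMU, Finset.mem_filter] at hc ⊢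
  exact ⟨hc.1, fun hm => hc.2 (h c hm)⟩

theorem pvIMU_add (g : List (List String)) (v : List (Int × Int)) (c : Int × Int) :
    pvIMU g (PySem.Set.add v c) = (pvIMU g v).erase c := by
  ext a
  simp only [pvIMU, Finset.mem_filter, Finset.mem_erase, PySem.Set.mem_add]
  tauto

theorem pvIMU_add_card (g : List (List String)) {v : List (Int × Int)} {c : Int × Int}
    (hc : c ∈ pvCells g) (hv : c ∉ v) :
    (pvIMU g (PySem.Set.add v c)).card + 1 = (pvIMU g v).card := by
  rw [pvIMU_add]
  rw [Finset.card_erase_of_mem (by simp [pvIMU, hc, hv])]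
  have : 0 < (pvIMU g v).card := Finset.card_pos.mpr ⟨c, by simp [pvIMU, hc, hv]⟩
  omega

theorem pvFoldA_isSome (g : List (List String)) (f : Nat) (y x : Int)
    (hrec : ∀ y' x' (v' : PySem.Set (Int × Int)), (y', x') ∈ pvCells g → (y', x') ∉ v' →
      (pvIMU g v').card < f → (pvGoA g f y' x' v').isSome) :
    ∀ (ds : List (Int × Int)) (acc : Int × Int × PySem.Set (Int × Int)),
      (pvIMU g acc.2.2).card < f → (ds.foldl (pvStepA g f y x) (some acc)).isSome := by
  intro ds
  induction ds with
  | nil => intro acc _; simp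
  | cons d ds ih =>
    intro acc hb
    rw [List.foldl_cons]
    by_cases hg : pvGuard g y x d = true
    · by_cases hc : PySem.Set.contains acc.2.2 (y + d.1, x + d.2) = true
      · simp only [pvStepA, Option.bind_some, hg, if_true, hc]
        exact ih _ hb
      · have hmem : (y + d.1, x + d.2) ∈ pvCells g := by
          have him : pvInMap g (y + d.1) (x + d.2) = true := by
            simp only [pvGuard, Bool.and_eq_true] at hg; exact hg.1
          exact (pvInMap_iff_mem g (y + d.1, x + d.2)).mp him
        have hnv : (y + d.1, x + d.2) ∉ acc.2.2 := by
          intro hm; rw [pvContains_true hm] at hc; exact hc rfl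
        obtain ⟨t1, ht1⟩ := Option.isSome_iff_exists.mp (hrec _ _ _ hmem hnv hb)
        simp only [pvStepA, Option.bind_some, hg, if_true, hc, if_false, Bool.false_eq_true, ht1,
          Option.map_some]
        apply ih
        calc (pvIMU g t1.2.2).card ≤ (pvIMU g acc.2.2).card :=
              pvIMU_anti g (pvGoA_sub g f _ _ _ _ ht1)
          _ < f := hb
    · simp only [pvStepA, Option.bind_some, hg, if_false, Bool.false_eq_true]
      exact ih _ hb

theorem pvGoA_isSome (g : List (List String)) :
    ∀ (f : Nat) (y x : Int) (v : PySem.Set (Int × Int)), (y, x) ∈ pvCells g → (y, x) ∉ v →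
      (pvIMU g v).card < f → (pvGoA g f y x v).isSome := by
  intro f
  induction f with
  | zero => intro y x v _ _ h; omega
  | succ f ih =>
    intro y x v hc hv hb
    rw [pvGoA_succ]
    apply pvFoldA_isSome g f y x (fun y' x' v' h1 h2 h3 => ih y' x' v' h1 h2 h3)
    show (pvIMU g (PySem.Set.add v (y, x))).card < f
    have := pvIMU_add_card g hc hv
    omega

theorem pvGoA_top_isSome (g : List (List String)) (f : Nat) (y x : Int)
    (v : PySem.Set (Int × Int)) (hf : (pvCells g).card + 1 < f) : (pvGoA g f y x v).isSome := by
  cases f with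
  | zero => omega
  | succ f =>
    rw [pvGoA_succ]
    apply pvFoldA_isSome g f y x (fun y' x' v' h1 h2 h3 => pvGoA_isSome g f y' x' v' h1 h2 h3)
    show (pvIMU g (PySem.Set.add v (y, x))).card < f
    have h1 : (pvIMU g (PySem.Set.add v (y, x))).card ≤ (pvCells g).card :=
      Finset.card_le_card (pvIMU_subset_cells g _)
    omega

-- B's inner for-loop: the stack gains exactly the pushed neighbours, adj gains the guard count
def pvPushList (g : List (List String)) (cy cx : Int) (vis q : PySem.Set (Int × Int))
    (ds : List (Int × Int)) : List (Int × Int) :=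
  ds.filterMap fun d =>
    if pvGuard g cy cx d && !PySem.Set.contains vis (cy + d.1, cx + d.2)
        && !PySem.Set.contains q (cy + d.1, cx + d.2) then some (cy + d.1, cx + d.2) else none

theorem pvPush_foldl (g : List (List String)) (cy cx : Int) (vis q : PySem.Set (Int × Int)) :
    ∀ (ds : List (Int × Int)) (s : List (Int × Int)) (b : Int),
      ds.foldl (pvPush g cy cx vis q) (s, b) =
        ((pvPushList g cy cx vis q ds).reverse ++ s, b + (ds.countP (pvGuard g cy cx) : Int)) := by
  intro ds
  induction ds with
  | nil => intro s b; simp [pvPushList]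
  | cons d ds ih =>
    intro s b
    rw [List.foldl_cons]
    by_cases hg : pvGuard g cy cx d = true
    · by_cases hp : (!PySem.Set.contains vis (cy + d.1, cx + d.2)
          && !PySem.Set.contains q (cy + d.1, cx + d.2)) = true
      · have hstep : pvPush g cy cx vis q (s, b) d = ((cy + d.1, cx + d.2) :: s, b + 1) := by
          simp only [pvPush, hg, if_true]
          rw [if_pos hp]
        rw [hstep, ih]
        simp only [pvPushList, List.filterMap_cons, hg, hp, Bool.true_and, if_true,
          List.countP_cons, List.append_assoc, Prod.mk.injEq]
        exact ⟨by simp, by simp [hg]; ring⟩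
      · have hstep : pvPush g cy cx vis q (s, b) d = (s, b + 1) := by
          simp only [pvPush, hg, if_true]
          rw [if_neg (by simp_all)]
        rw [hstep, ih]
        simp only [pvPushList, List.filterMap_cons, List.countP_cons, Prod.mk.injEq]
        rw [if_neg (by simp_all)]
        exact ⟨rfl, by simp [hg]; ring⟩
    · have hstep : pvPush g cy cx vis q (s, b) d = (s, b) := by simp [pvPush, hg]
      rw [hstep, ih]
      simp [pvPushList, hg]

theorem pvPush_rev (g : List (List String)) (cy cx : Int) (vis q : PySem.Set (Int × Int))
    (st : List (Int × Int)) (b : Int) :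
    pvDirs.reverse.foldl (pvPush g cy cx vis q) (st, b) =
      (pvPushList g cy cx vis q pvDirs ++ st, b + (pvDirs.countP (pvGuard g cy cx) : Int)) := by
  rw [pvPush_foldl]
  simp only [pvPushList, List.filterMap_reverse, List.reverse_reverse, List.countP_reverse]

theorem pvPushList_inMap (g : List (List String)) (cy cx : Int) (vis q : PySem.Set (Int × Int))
    (ds : List (Int × Int)) : ∀ m ∈ pvPushList g cy cx vis q ds, pvInMap g m.1 m.2 = true := by
  intro m hm
  simp only [pvPushList, List.mem_filterMap] at hm
  obtain ⟨d, _, hd⟩ := hm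
  split at hd
  · rename_i hcond
    cases hd
    simp only [Bool.and_eq_true, pvGuard] at hcond
    exact hcond.1.1.1
  · cases hd

theorem pvLoopB_mono (g : List (List String)) (vis : PySem.Set (Int × Int)) :
    ∀ (f : Nat) st p (a b : Int) r, pvLoopB g vis f st p a b = some r →
      pvLoopB g vis (f + 1) st p a b = some r := by
  intro f
  induction f with
  | zero => intro st p a b r h; cases h
  | succ f ih =>
    intro st p a b r h
    cases st with
    | nil => exact h
    | cons c st =>
      rw [pvLoopB] at h ⊢
      by_cases hc : PySem.Set.contains p c = true
      · rw [if_pos hc] at h ⊢; exact ih _ _ _ _ _ h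
      · rw [if_neg hc] at h ⊢; exact ih _ _ _ _ _ h

theorem pvLoopB_mono_le (g : List (List String)) (vis : PySem.Set (Int × Int))
    {f f' : Nat} (hle : f ≤ f') {st p} {a b : Int} {r} (h : pvLoopB g vis f st p a b = some r) :
    pvLoopB g vis f' st p a b = some r := by
  induction hle with
  | refl => exact h
  | step _ ih => exact pvLoopB_mono g vis _ _ _ _ _ _ ih

def pvWeight (g : List (List String)) (c : Int × Int) : Nat :=
  if pvInMap g c.1 c.2 then 1 else 5

noncomputable def pvMu (g : List (List String)) (st : List (Int × Int)) (p : List (Int × Int)) : Nat :=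
  (st.map (pvWeight g)).sum + 5 * (pvIMU g p).card

theorem pvSumOnes {w : (Int × Int) → Nat} {L : List (Int × Int)}
    (h : ∀ m ∈ L, w m = 1) : (L.map w).sum = L.length := by
  rw [List.map_congr_left h]
  simp

theorem pvLoopB_isSome (g : List (List String)) (vis : PySem.Set (Int × Int)) :
    ∀ (f : Nat) st (p : PySem.Set (Int × Int)) (a b : Int),
      pvMu g st p < f → (pvLoopB g vis f st p a b).isSome := by
  intro f
  induction f with
  | zero => intro st p a b h; omega
  | succ f ih =>
    intro st p a b hb
    cases st with
    | nil => simp [pvLoopB]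
    | cons c st =>
      rw [pvLoopB]
      have hw1 : 1 ≤ pvWeight g c := by unfold pvWeight; split <;> omega
      by_cases hc : PySem.Set.contains p c = true
      · rw [if_pos hc]
        apply ih
        simp only [pvMu, List.map_cons, List.sum_cons] at hb ⊢
        omega
      · rw [if_neg hc]
        simp only
        rw [pvPush_rev]
        apply ih
        have hnp : c ∉ p := fun hm => hc (pvContains_true hm)
        have hLmap : ((pvPushList g c.1 c.2 vis (PySem.Set.add p c) pvDirs).map (pvWeight g)).sum
            = (pvPushList g c.1 c.2 vis (PySem.Set.add p c) pvDirs).length :=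
          pvSumOnes (fun m hm => by
            unfold pvWeight
            rw [if_pos (pvPushList_inMap g c.1 c.2 vis _ pvDirs m hm)])
        have hLlen : (pvPushList g c.1 c.2 vis (PySem.Set.add p c) pvDirs).length ≤ 4 := by
          have hfm := List.length_filterMap_le (fun d =>
            if pvGuard g c.1 c.2 d && !PySem.Set.contains vis (c.1 + d.1, c.2 + d.2)
              && !PySem.Set.contains (PySem.Set.add p c) (c.1 + d.1, c.2 + d.2)
            then some (c.1 + d.1, c.2 + d.2) else none) pvDirs
          simpa [pvPushList, pvDirs] using hfm
        have hmono : (pvIMU g (PySem.Set.add p c)).card ≤ (pvIMU g p).card :=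
          pvIMU_anti g (fun n hn => (PySem.Set.mem_add p c n).mpr (Or.inl hn))
        simp only [pvMu, List.map_append, List.sum_append, List.map_cons, List.sum_cons] at hb ⊢
        by_cases him : pvInMap g c.1 c.2 = true
        · have hcard := pvIMU_add_card g ((pvInMap_iff_mem g c).mp him) hnp
          have hwc : pvWeight g c = 1 := by unfold pvWeight; rw [if_pos him]
          omega
        · have hwc : pvWeight g c = 5 := by unfold pvWeight; rw [if_neg him]
          omega

-- A's visited set is exactly B's fixed `visited` plus B's growing `processed`
def pvExt (v vis p : List (Int × Int)) : Prop :=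
  ∀ n : Int × Int, n ∈ v ↔ (n ∈ vis ∨ n ∈ p)

-- One level of A's direction fold simulated on B's stack.  q is the (stale) processed set
-- the pushes were filtered with; the continuation is shift-polymorphic in the accumulators.
theorem pvSimDirs (g : List (List String)) (vis : PySem.Set (Int × Int)) (f : Nat) (y x : Int)
    (hIH : ∀ (y' x' : Int) (v : PySem.Set (Int × Int)) (dA dAj : Int) v',
      pvGoA g f y' x' v = some (dA, dAj, v') →
      ∀ (p : PySem.Set (Int × Int)), pvExt v vis p → (y', x') ∉ p →
      ∃ p' : PySem.Set (Int × Int), pvExt v' vis p' ∧ (∀ n, n ∈ p → n ∈ p') ∧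
        ∀ st (a b : Int) r, (∃ fb, pvLoopB g vis fb st p' (a + dA) (b + dAj) = some r) →
          ∃ fb, pvLoopB g vis fb ((y', x') :: st) p a b = some r) :
    ∀ (ds : List (Int × Int)) (v : PySem.Set (Int × Int)) (a0 b0 aF bF : Int) vF,
      ds.foldl (pvStepA g f y x) (some (a0, b0, v)) = some (aF, bF, vF) →
      ∀ (p q : PySem.Set (Int × Int)), pvExt v vis p → (∀ n, n ∈ q → n ∈ p) →
      ∃ p' : PySem.Set (Int × Int), pvExt vF vis p' ∧ (∀ n, n ∈ p → n ∈ p') ∧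
        ∀ st (u w : Int) r, (∃ fb, pvLoopB g vis fb st p' (aF + u) (bF + w) = some r) →
          ∃ fb, pvLoopB g vis fb (pvPushList g y x vis q ds ++ st) p (a0 + u)
            (b0 + (ds.countP (pvGuard g y x) : Int) + w) = some r := by
  intro ds
  induction ds with
  | nil =>
    intro v a0 b0 aF bF vF h p q hext hq
    simp only [List.foldl_nil, Option.some.injEq, Prod.mk.injEq] at h
    obtain ⟨h1, h2, h3⟩ := h
    subst h1; subst h2; subst h3
    refine ⟨p, hext, fun n hn => hn, ?_⟩
    intro st u w r hr
    simpa [pvPushList] using hr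
  | cons d ds ih =>
    intro v a0 b0 aF bF vF h p q hext hq
    rw [List.foldl_cons] at h
    by_cases hg : pvGuard g y x d = true
    · by_cases hc : PySem.Set.contains v (y + d.1, x + d.2) = true
      · -- same-colour in-map neighbour already visited: adj+1, no recursion in A;
        -- B either never pushed it or will pop it and skip
        simp only [pvStepA, Option.bind_some, hg, if_true, hc] at h
        obtain ⟨p', hext', hsub', hcont⟩ := ih v a0 (b0 + 1) aF bF vF h p q hext hq
        refine ⟨p', hext', hsub', ?_⟩
        intro st u w r hr
        obtain ⟨fb, hfb⟩ := hcont st u w r hr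
        have hvmem : (y + d.1, x + d.2) ∈ v := by
          by_contra hx
          rw [pvContains_false hx] at hc
          exact absurd hc (by simp)
        have hcnt : b0 + (List.countP (pvGuard g y x) (d :: ds) : Int) + w
            = b0 + 1 + (List.countP (pvGuard g y x) ds : Int) + w := by
          rw [List.countP_cons, if_pos hg]
          push_cast
          ring
        rw [hcnt]
        by_cases hpush : (!PySem.Set.contains vis (y + d.1, x + d.2)
            && !PySem.Set.contains q (y + d.1, x + d.2)) = true
        · -- it was pushed: one skip step at pop time
          have hpmem : (y + d.1, x + d.2) ∈ p := by
            rcases (hext _).mp hvmem with hvis | hp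
            · exfalso
              simp only [Bool.and_eq_true, Bool.not_eq_eq_eq_not, Bool.not_true] at hpush
              rw [pvContains_true hvis] at hpush
              exact absurd hpush.1 (by simp)
            · exact hp
          refine ⟨fb + 1, ?_⟩
          have hcond : (pvGuard g y x d && !PySem.Set.contains vis (y + d.1, x + d.2)
              && !PySem.Set.contains q (y + d.1, x + d.2)) = true := by
            rw [hg, Bool.true_and]
            exact hpush
          have hstack : pvPushList g y x vis q (d :: ds) ++ st
              = (y + d.1, x + d.2) :: (pvPushList g y x vis q ds ++ st) := by
            unfold pvPushList
            rw [List.filterMap_cons]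
            simp only [hcond, if_true, List.cons_append]
          rw [hstack, pvLoopB, if_pos (pvContains_true hpmem)]
          exact hfb
        · -- it was not pushed (already visited/processed at push time): nothing on the stack
          refine ⟨fb, ?_⟩
          have hcond : (pvGuard g y x d && !PySem.Set.contains vis (y + d.1, x + d.2)
              && !PySem.Set.contains q (y + d.1, x + d.2)) = false := by
            rw [hg, Bool.true_and]
            exact Bool.eq_false_iff.mpr hpush
          have hstack : pvPushList g y x vis q (d :: ds) = pvPushList g y x vis q ds := by
            unfold pvPushList
            rw [List.filterMap_cons]
            simp only [hcond, Bool.false_eq_true, if_false]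
          rw [hstack]
          exact hfb
      · -- unvisited same-colour neighbour: A recurses, B pushed it and pops it next
        simp only [pvStepA, Option.bind_some, hg, if_true, hc, if_false, Bool.false_eq_true] at h
        cases hE : pvGoA g f (y + d.1) (x + d.2) v with
        | none => rw [hE] at h; simp only [Option.map_none] at h; rw [pvFoldA_none] at h; cases h
        | some t1 =>
          rw [hE] at h
          simp only [Option.map_some] at h
          have hnv : (y + d.1, x + d.2) ∉ v := fun hm => by
            rw [pvContains_true hm] at hc; exact hc rfl
          have hnvis : (y + d.1, x + d.2) ∉ vis := fun hm => hnv ((hext _).mpr (Or.inl hm))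
          have hnp : (y + d.1, x + d.2) ∉ p := fun hm => hnv ((hext _).mpr (Or.inr hm))
          have hnq : (y + d.1, x + d.2) ∉ q := fun hm => hnp (hq _ hm)
          obtain ⟨p1, hext1, hsub1, hcont1⟩ :=
            hIH (y + d.1) (x + d.2) v t1.1 t1.2.1 t1.2.2 (by rw [hE]) p hext hnp
          obtain ⟨p', hext', hsub', hcont2⟩ :=
            ih t1.2.2 (a0 + t1.1) (b0 + 1 + t1.2.1) aF bF vF h p1 q hext1
              (fun n hn => hsub1 n (hq n hn))
          refine ⟨p', hext', fun n hn => hsub' n (hsub1 n hn), ?_⟩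
          intro st u w r hr
          have step2 := hcont2 st u w r hr
          have step2' : ∃ fb, pvLoopB g vis fb (pvPushList g y x vis q ds ++ st) p1
              ((a0 + u) + t1.1) ((b0 + 1 + (List.countP (pvGuard g y x) ds : Int) + w) + t1.2.1)
              = some r := by
            obtain ⟨fb, hfb⟩ := step2
            refine ⟨fb, ?_⟩
            rw [show (a0 + u) + t1.1 = a0 + t1.1 + u from by ring,
                show (b0 + 1 + (List.countP (pvGuard g y x) ds : Int) + w) + t1.2.1
                  = b0 + 1 + t1.2.1 + (List.countP (pvGuard g y x) ds : Int) + w from by ring]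
            exact hfb
          obtain ⟨fb, hfb⟩ := hcont1 (pvPushList g y x vis q ds ++ st) (a0 + u)
            (b0 + 1 + (List.countP (pvGuard g y x) ds : Int) + w) r step2'
          refine ⟨fb, ?_⟩
          have hcond : (pvGuard g y x d && !PySem.Set.contains vis (y + d.1, x + d.2)
              && !PySem.Set.contains q (y + d.1, x + d.2)) = true := by
            rw [hg, pvContains_false hnvis, pvContains_false hnq]
            rfl
          have hstack : pvPushList g y x vis q (d :: ds) ++ st
              = (y + d.1, x + d.2) :: (pvPushList g y x vis q ds ++ st) := by
            unfold pvPushList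
            rw [List.filterMap_cons]
            simp only [hcond, if_true, List.cons_append]
          rw [hstack,
            show b0 + (List.countP (pvGuard g y x) (d :: ds) : Int) + w
              = b0 + 1 + (List.countP (pvGuard g y x) ds : Int) + w from by
                rw [List.countP_cons, if_pos hg]; push_cast; ring]
          exact hfb
    · -- guard false: A skips the direction, B neither counts nor pushes
      simp only [pvStepA, Option.bind_some, hg, if_false, Bool.false_eq_true] at h
      obtain ⟨p', hext', hsub', hcont⟩ := ih v a0 b0 aF bF vF h p q hext hq
      refine ⟨p', hext', hsub', ?_⟩
      intro st u w r hr
      obtain ⟨fb, hfb⟩ := hcont st u w r hr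
      refine ⟨fb, ?_⟩
      have hgf : pvGuard g y x d = false := Bool.eq_false_iff.mpr hg
      have hcondf : (pvGuard g y x d && !PySem.Set.contains vis (y + d.1, x + d.2)
          && !PySem.Set.contains q (y + d.1, x + d.2)) = false := by
        rw [hgf]
        rfl
      have hstack : pvPushList g y x vis q (d :: ds) = pvPushList g y x vis q ds := by
        unfold pvPushList
        rw [List.filterMap_cons]
        simp only [hcondf, Bool.false_eq_true, if_false]
      rw [hstack, List.countP_cons, if_neg (by simp [hgf])]
      exact hfb

-- the simulation: one A-call equals B processing that cell off the stack
theorem pvSim (g : List (List String)) (vis : PySem.Set (Int × Int)) :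
    ∀ (f : Nat) (y x : Int) (v : PySem.Set (Int × Int)) (dA dAj : Int) v',
      pvGoA g f y x v = some (dA, dAj, v') →
      ∀ (p : PySem.Set (Int × Int)), pvExt v vis p → (y, x) ∉ p →
      ∃ p' : PySem.Set (Int × Int), pvExt v' vis p' ∧ (∀ n, n ∈ p → n ∈ p') ∧
        ∀ st (a b : Int) r, (∃ fb, pvLoopB g vis fb st p' (a + dA) (b + dAj) = some r) →
          ∃ fb, pvLoopB g vis fb ((y, x) :: st) p a b = some r := by
  intro f
  induction f with
  | zero => intro y x v dA dAj v' h; cases h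
  | succ f ih =>
    intro y x v dA dAj v' h p hext hnp
    rw [pvGoA_succ] at h
    have hext1 : pvExt (PySem.Set.add v (y, x)) vis (PySem.Set.add p (y, x)) := by
      intro n
      rw [PySem.Set.mem_add, PySem.Set.mem_add, hext n]
      tauto
    obtain ⟨p', hext', hsub', hcont⟩ :=
      pvSimDirs g vis f y x ih pvDirs (PySem.Set.add v (y, x)) 1 0 dA dAj v' h
        (PySem.Set.add p (y, x)) (PySem.Set.add p (y, x)) hext1 (fun n hn => hn)
    refine ⟨p', hext', fun n hn => hsub' n ((PySem.Set.mem_add p (y, x) n).mpr (Or.inl hn)), ?_⟩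
    intro st a b r hr
    have hr' : ∃ fb, pvLoopB g vis fb st p' (dA + a) (dAj + b) = some r := by
      obtain ⟨fb, hfb⟩ := hr
      refine ⟨fb, ?_⟩
      rw [show dA + a = a + dA from by ring, show dAj + b = b + dAj from by ring]
      exact hfb
    obtain ⟨fb, hfb⟩ := hcont st a b r hr'
    refine ⟨fb + 1, ?_⟩
    rw [pvLoopB, if_neg (by rw [pvContains_false hnp]; simp)]
    simp only
    rw [pvPush_rev]
    rw [show a + 1 = 1 + a from by ring]
    rw [show b + (List.countP (pvGuard g y x) pvDirs : Int)
        = 0 + (List.countP (pvGuard g y x) pvDirs : Int) + b from by ring]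
    exact hfb

theorem findPlot_eq_alt (y : Int) (x : Int) (garden : List (List String)) (visited : List (Int × Int)) :
    findPlot y x garden visited = findPlot_alt y x garden visited := by
  have hA : (pvGoA garden (garden.length * (garden.headD []).length + 3) y x
      (PySem.Set.ofList visited)).isSome := by
    apply pvGoA_top_isSome
    rw [pvCells_card]
    omega
  obtain ⟨⟨dA, dAj, v'⟩, ht⟩ := Option.isSome_iff_exists.mp hA
  have hext0 : pvExt (PySem.Set.ofList visited) (PySem.Set.ofList visited) PySem.Set.empty := by
    intro n
    simp [PySem.Set.empty]
  obtain ⟨p', _, _, hcont⟩ := pvSim garden (PySem.Set.ofList visited) _ y x _ dA dAj v' ht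
    PySem.Set.empty hext0 (by simp [PySem.Set.empty])
  have hbase : ∃ fb, pvLoopB garden (PySem.Set.ofList visited) fb [] p' (0 + dA) (0 + dAj)
      = some (0 + dA, 0 + dAj) := ⟨1, rfl⟩
  obtain ⟨fb, hfb⟩ := hcont [] 0 0 (0 + dA, 0 + dAj) hbase
  have hB : (pvLoopB garden (PySem.Set.ofList visited)
      (5 * (garden.length * (garden.headD []).length) + 6) [(y, x)] PySem.Set.empty 0 0).isSome := by
    apply pvLoopB_isSome
    have hcard : (pvIMU garden PySem.Set.empty).card ≤ (pvCells garden).card :=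
      Finset.card_le_card (pvIMU_subset_cells garden _)
    rw [pvCells_card] at hcard
    have hw : pvWeight garden (y, x) ≤ 5 := by unfold pvWeight; split <;> omega
    simp only [pvMu, List.map_cons, List.map_nil, List.sum_cons, List.sum_nil]
    omega
  obtain ⟨r2, hr2⟩ := Option.isSome_iff_exists.mp hB
  have h1 := pvLoopB_mono_le garden (PySem.Set.ofList visited)
    (Nat.le_max_left fb (5 * (garden.length * (garden.headD []).length) + 6)) hfb
  have h2 := pvLoopB_mono_le garden (PySem.Set.ofList visited)
    (Nat.le_max_right fb (5 * (garden.length * (garden.headD []).length) + 6)) hr2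
  rw [h1] at h2
  have hr2eq : r2 = (dA, dAj) := by
    have := h2.symm
    simp only [Option.some.injEq] at this
    rw [this]
    simp
  unfold findPlot findPlot_alt
  rw [ht, hr2, hr2eq]
  rfl

-- ===== VERDICT (by name: the statement is the Claim_ definition above) =====
theorem findPlot_spec : Claim_equal_findPlot := by
  intro y x garden visited _ _
  unfold Spec_findPlot
  exact findPlot_eq_alt y x garden visited
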